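-- pv_equiv track=rewrite | github.com/RianKatoen/advent-of-code-2023 | day12/puzzle.py | get_spring_options
-- ===== SOURCE A (Python) =====
-- from typing import Generator
--
-- def get_spring_options(line: str, spring: int, n_hash: int = 0, total_hashes: int = 0, prev: str = '') -> Generator[tuple[int, str], None, None]:
--     if spring == n_hash:
--         yield (n_hash, line)
--         return
--
--     if total_hashes > spring or line == '':
--         return
--
--     if line[0] == '#' or line[0] == '?':
--         for hc, l in get_spring_options(line[1:], spring, n_hash + 1, total_hashes + 1, line[0]):
--             yield (hc, '#' + l)
--
--     if line[0] == '?':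
--         for hc, l in get_spring_options(line[1:], spring, 0, total_hashes, line[0]):
--             yield (hc, '.' + l)
-- ===== SOURCE B (Python) =====
-- def get_spring_options(line: str, spring: int, n_hash: int = 0, total_hashes: int = 0, prev: str = ''):
--     # iterative DFS with an explicit LIFO stack; prefix built on the way down
--     stack = [(line, n_hash, total_hashes, '')]
--     while stack:
--         rem, nh, th, pre = stack.pop()
--         if spring == nh:
--             yield (nh, pre + rem)
--             continue
--         if th > spring or rem == '':
--             continue
--         c, rest = rem[0], rem[1:]
--         if c == '?':
--             stack.append((rest, 0, th, pre + '.'))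
--         if c == '#' or c == '?':
--             stack.append((rest, nh + 1, th + 1, pre + '#'))
-- ===== Notes on version B (the rewrite author's own statement) =====
-- stated objective: alternative
-- what changed: Replaces A's recursive generator (which prepends a character to every result of each recursive call) with an iterative preorder DFS over an explicit LIFO stack of (remaining, n_hash, total_hashes, prefix) frames, building the prefix on the way down and emitting prefix+remaining at the base case.
import Mathlib
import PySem

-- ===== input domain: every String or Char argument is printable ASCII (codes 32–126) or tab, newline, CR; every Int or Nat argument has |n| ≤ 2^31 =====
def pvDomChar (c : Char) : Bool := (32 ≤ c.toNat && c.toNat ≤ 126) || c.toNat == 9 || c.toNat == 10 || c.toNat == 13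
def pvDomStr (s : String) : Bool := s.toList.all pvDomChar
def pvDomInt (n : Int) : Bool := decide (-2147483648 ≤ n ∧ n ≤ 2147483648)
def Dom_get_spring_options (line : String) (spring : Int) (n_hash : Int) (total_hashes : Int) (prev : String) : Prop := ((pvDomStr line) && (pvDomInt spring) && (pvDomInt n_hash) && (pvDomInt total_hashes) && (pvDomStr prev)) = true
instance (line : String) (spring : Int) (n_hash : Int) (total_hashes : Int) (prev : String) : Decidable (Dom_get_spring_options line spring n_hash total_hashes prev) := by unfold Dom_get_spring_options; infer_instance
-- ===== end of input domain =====

-- B is an explicit-stack iterative DFS replacing A's recursion; return-value equivalence only (same yielded list); objective: alternative decomposition, not faster.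

-- ===== PORT A =====
-- recursive transliteration of A over the character list of `line`; `prev` is passed in Python but never read
def gsoA (cs : List Char) (spring n_hash total_hashes : Int) : List (Int × List Char) :=
  if spring = n_hash then [(n_hash, cs)]
  else if total_hashes > spring ∨ cs = [] then []
  else match cs with
    | [] => []
    | c :: rest =>
      (if c = '#' ∨ c = '?' then
          (gsoA rest spring (n_hash + 1) (total_hashes + 1)).map (fun p => (p.1, '#' :: p.2))
        else []) ++
      (if c = '?' then
          (gsoA rest spring 0 total_hashes).map (fun p => (p.1, '.' :: p.2))
        else [])

def get_spring_options (line : String) (spring : Int) (n_hash : Int) (total_hashes : Int) (prev : String) : List (Int × String) :=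
  (gsoA line.toList spring n_hash total_hashes).map (fun p => (p.1, String.ofList p.2))

-- ===== PORT B =====
-- frame: (remaining, n_hash, total_hashes, prefix)
def gsoB (spring : Int) (stack : List (List Char × Int × Int × List Char)) : List (Int × String) :=
  match stack with
  | [] => []
  | (rem, nh, th, pre) :: stk =>
    if spring = nh then (nh, String.ofList (pre ++ rem)) :: gsoB spring stk
    else if th > spring ∨ rem = [] then gsoB spring stk
    else match rem with
      | [] => gsoB spring stk
      | c :: rest =>
        let stk1 := if c = '?' then (rest, (0 : Int), th, pre ++ ['.']) :: stk else stk
        let stk2 := if c = '#' ∨ c = '?' then (rest, nh + 1, th + 1, pre ++ ['#']) :: stk1 else stk1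
        gsoB spring stk2
termination_by (stack.map (fun f => 3 ^ f.1.length)).sum
decreasing_by
  · simp only [List.map_cons, List.sum_cons]
    have h3 : 1 ≤ 3 ^ rem.length := Nat.one_le_pow _ _ (by norm_num); omega
  · simp only [List.map_cons, List.sum_cons]
    have h3 : 1 ≤ 3 ^ rem.length := Nat.one_le_pow _ _ (by norm_num); omega
  · simp only [List.map_cons, List.sum_cons, List.length_nil, pow_zero]; omega
  · have h3 : 1 ≤ 3 ^ rest.length := Nat.one_le_pow _ _ (by norm_num)
    split_ifs <;>
      simp only [List.map_cons, List.sum_cons, List.length_cons, pow_succ] <;> omega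

def get_spring_options_alt (line : String) (spring : Int) (n_hash : Int) (total_hashes : Int) (prev : String) : List (Int × String) :=
  gsoB spring [(line.toList, n_hash, total_hashes, [])]

-- ===== PRECONDITION & SPEC =====
def Spec_get_spring_options (line : String) (spring : Int) (n_hash : Int) (total_hashes : Int) (prev : String) (out : List (Int × String)) : Prop := out = get_spring_options_alt line spring n_hash total_hashes prev
instance (line : String) (spring : Int) (n_hash : Int) (total_hashes : Int) (prev : String) (out : List (Int × String)) : Decidable (Spec_get_spring_options line spring n_hash total_hashes prev out) := by unfold Spec_get_spring_options; infer_instance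

-- ===== CLAIM (what is proved, stated in full; the proofs are below) =====
def Claim_equal_get_spring_options : Prop := ∀ (line : String) (spring : Int) (n_hash : Int) (total_hashes : Int) (prev : String), Dom_get_spring_options line spring n_hash total_hashes prev → Spec_get_spring_options line spring n_hash total_hashes prev (get_spring_options line spring n_hash total_hashes prev)

-- ===== LEMMAS AND PROOFS =====

-- stack invariant: running B on a frame pushed onto stk yields A's results for that frame
-- (with the prefix prepended) followed by the results of the rest of the stack
theorem gsoB_frame (rem : List Char) (spring nh th : Int) (pre : List Char)
    (stk : List (List Char × Int × Int × List Char)) :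
    gsoB spring ((rem, nh, th, pre) :: stk)
      = (gsoA rem spring nh th).map (fun p => (p.1, String.ofList (pre ++ p.2))) ++ gsoB spring stk := by
  induction rem generalizing nh th pre stk with
  | nil =>
    rw [gsoB, gsoA]
    split_ifs with h1 h2 <;> simp_all
  | cons c rest ih =>
    rw [gsoB, gsoA]
    by_cases h1 : spring = nh
    · simp [h1]
    · by_cases h2 : spring < th
      · simp [if_neg h1, if_pos h2]
      · have hor : ¬(th > spring ∨ (c :: rest : List Char) = []) := by simp [h2]
        simp only [if_neg h1, if_neg hor]
        split_ifs with hP hQ hQ'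
        · rw [ih, ih]
          simp only [List.map_map, Function.comp_def, List.append_assoc,
            List.singleton_append, List.map_append]
        · rw [ih]
          simp only [List.map_map, Function.comp_def, List.append_assoc,
            List.singleton_append, List.append_nil]
        · exact absurd (Or.inr hQ') hP
        · simp

-- ===== VERDICT (by name: the statement is the Claim_ definition above) =====
theorem get_spring_options_spec : Claim_equal_get_spring_options := by
  intro line spring n_hash total_hashes prev _
  unfold Spec_get_spring_options get_spring_options get_spring_options_alt
  rw [gsoB_frame]
  simp [gsoB]
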